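-- pv_equiv track=rewrite | github.com/tobias2912/metaheuristics | src/operators.py | __get_car_index
-- ===== SOURCE A (Python) =====
-- def __get_car_index(car_number, solution, num_cars):
--     """
--         all call indices start <= i <= stop are part of car
--         loop with solution[start:stop+1]
--         Returns: (start, stop)
--     """
--     if car_number == num_cars + 1:
--         # dummy car
--         sol = solution.copy()
--         start, stop = __get_car_index(1, sol[::-1], num_cars)
--         return len(solution) - stop - 1, len(solution) + 1
--     # find start
--     car_counter = 1
--     start = 0
--     for index, call in enumerate(solution):
--         if call == 0:
--             car_counter += 1
--             if car_counter == car_number: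
--                 start = index + 1
--             if car_counter == car_number + 1:
--                 stop = index - 1
--                 return start, stop
--     raise Exception("index faile", solution)
-- ===== SOURCE B (Python) =====
-- def __get_car_index(car_number, solution, num_cars):
--     """
--         all call indices start <= i <= stop are part of car
--         loop with solution[start:stop+1]
--         Returns: (start, stop)
--     """
--     zeros = [i for i, c in enumerate(solution) if c == 0]
--     if car_number == num_cars + 1:
--         # dummy car: everything after the last separator
--         return zeros[-1] + 1, len(solution) + 1
--     if car_number < 1 or len(zeros) < car_number:
--         raise Exception("index faile", solution)
--     start = 0 if car_number == 1 else zeros[car_number - 2] + 1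
--     return start, zeros[car_number - 1] - 1
-- ===== Notes on version B (the rewrite author's own statement) =====
-- stated objective: simpler
-- what changed: B precomputes the list of zero positions once and answers by direct indexing into it (and computes the dummy-car answer directly from the last zero, without A's recursion on the reversed list), replacing A's counter-driven scan with mutable loop state.
import Mathlib
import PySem

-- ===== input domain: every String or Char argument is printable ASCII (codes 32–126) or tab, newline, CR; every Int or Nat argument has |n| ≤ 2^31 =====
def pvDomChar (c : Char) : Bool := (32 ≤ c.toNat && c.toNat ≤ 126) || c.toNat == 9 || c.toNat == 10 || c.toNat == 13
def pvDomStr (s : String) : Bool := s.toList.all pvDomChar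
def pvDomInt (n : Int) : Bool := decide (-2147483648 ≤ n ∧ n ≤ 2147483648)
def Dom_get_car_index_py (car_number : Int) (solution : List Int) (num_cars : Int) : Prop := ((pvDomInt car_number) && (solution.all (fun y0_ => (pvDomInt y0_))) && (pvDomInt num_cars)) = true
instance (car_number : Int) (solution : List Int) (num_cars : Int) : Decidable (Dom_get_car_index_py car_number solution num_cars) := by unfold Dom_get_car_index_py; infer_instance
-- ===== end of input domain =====

-- B replaces A's counter-driven scan with one precomputed list of zero positions and direct
-- indexing (and a non-recursive dummy-car branch); objective: simpler. Return values only
-- (A does not mutate its arguments observably: it copies before reversing).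

-- ===== PORT A =====
-- the 'for index, call in enumerate(solution)' loop of A, with state (index, car_counter, start);
-- returns none where the loop falls through (Python then raises Exception("index faile", solution))
def scanA (car : Int) : List Int → Int → Int → Int → Option (Int × Int)
  | [], _, _, _ => none
  | call :: rest, idx, cc, start =>
    if call = 0 then
      let cc' := cc + 1
      let start' := if cc' = car then idx + 1 else start
      if cc' = car + 1 then some (start', idx - 1)
      else scanA car rest (idx + 1) cc' start'
    else scanA car rest (idx + 1) cc start

def get_car_index_py (car_number : Int) (solution : List Int) (num_cars : Int) : Int × Int :=
  if car_number = num_cars + 1 then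
    if num_cars = 0 then (0, 0)  -- totality guard only: Python recurses forever here (excluded by Pre_)
    else
      -- sol = solution.copy(); __get_car_index(1, sol[::-1], num_cars)
      let s := get_car_index_py 1 solution.reverse num_cars
      ((solution.length : Int) - s.2 - 1, (solution.length : Int) + 1)
  else
    match scanA car_number solution 0 1 0 with
    | some r => r
    | none => (0, 0)  -- raise Exception("index faile", solution); excluded by Pre_
termination_by (if car_number = num_cars + 1 then 1 else 0 : Nat)
decreasing_by simp_all

-- ===== PORT B =====
def get_car_index_py_alt (car_number : Int) (solution : List Int) (num_cars : Int) : Int × Int :=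
  -- zeros = [i for i, c in enumerate(solution) if c == 0]
  let zeros : List Int :=
    (PySem.List.enumerate solution 0).filterMap (fun p => if p.2 = 0 then some p.1 else none)
  if car_number = num_cars + 1 then
    match PySem.List.pyGet? zeros (-1) with  -- zeros[-1]
    | some z => (z + 1, (solution.length : Int) + 1)
    | none => (0, 0)  -- IndexError; excluded by Pre_
  else if car_number < 1 ∨ (zeros.length : Int) < car_number then
    (0, 0)  -- raise Exception("index faile", solution); excluded by Pre_
  else
    let start : Int := if car_number = 1 then 0
      else (PySem.List.pyGet? zeros (car_number - 2)).getD 0 + 1  -- in range under the guard above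
    (start, (PySem.List.pyGet? zeros (car_number - 1)).getD 0 - 1)

-- ===== PRECONDITION & SPEC =====
-- Pre_ is exactly the set of inputs on which Python A terminates normally: the dummy-car branch
-- needs num_cars ≠ 0 (else A recurses forever) and at least one 0; a normal car needs
-- 1 ≤ car_number and at least car_number zeros (else A raises Exception("index faile", solution)).
def Pre_get_car_index_py (car_number : Int) (solution : List Int) (num_cars : Int) : Prop :=
  if car_number = num_cars + 1 then num_cars ≠ 0 ∧ 1 ≤ solution.count 0
  else 1 ≤ car_number ∧ car_number ≤ (solution.count 0 : Int)
instance (car_number : Int) (solution : List Int) (num_cars : Int) : Decidable (Pre_get_car_index_py car_number solution num_cars) := by unfold Pre_get_car_index_py; infer_instance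

def pvWitness_get_car_index_py : Int × List Int × Int := (1, [3, 0, 2, 0], 2)

def Spec_get_car_index_py (car_number : Int) (solution : List Int) (num_cars : Int) (out : Int × Int) : Prop := out = get_car_index_py_alt car_number solution num_cars
instance (car_number : Int) (solution : List Int) (num_cars : Int) (out : Int × Int) : Decidable (Spec_get_car_index_py car_number solution num_cars out) := by unfold Spec_get_car_index_py; infer_instance

-- ===== CLAIM (what is proved, stated in full; the proofs are below) =====
def Claim_equal_get_car_index_py : Prop := ∀ (car_number : Int) (solution : List Int) (num_cars : Int), Dom_get_car_index_py car_number solution num_cars → Pre_get_car_index_py car_number solution num_cars → Spec_get_car_index_py car_number solution num_cars (get_car_index_py car_number solution num_cars)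

-- ===== LEMMAS AND PROOFS =====

-- positions (offset by s) of the zeros of a list
def zerosFrom (s : Int) : List Int → List Int
  | [] => []
  | call :: rest => if call = 0 then s :: zerosFrom (s + 1) rest else zerosFrom (s + 1) rest

theorem zerosFrom_eq_filterMap : ∀ (l : List Int) (s : Int),
    (PySem.List.enumerate l s).filterMap (fun p => if p.2 = 0 then some p.1 else none)
      = zerosFrom s l := by
  intro l
  induction l with
  | nil => intro s; simp [zerosFrom, PySem.List.enumerate_nil]
  | cons a t ih =>
    intro s
    simp only [PySem.List.enumerate_cons, List.filterMap_cons, zerosFrom]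
    by_cases h : a = 0 <;> simp [h, ih]

theorem length_zerosFrom : ∀ (l : List Int) (s : Int),
    (zerosFrom s l).length = l.count 0 := by
  intro l
  induction l with
  | nil => intro s; simp [zerosFrom]
  | cons a t ih =>
    intro s
    by_cases h : a = 0 <;> simp [zerosFrom, h, ih]

theorem zerosFrom_shift : ∀ (l : List Int) (s : Int),
    zerosFrom s l = (zerosFrom 0 l).map (fun z => s + z) := by
  intro l
  induction l with
  | nil => intro s; simp [zerosFrom]
  | cons a t ih =>
    intro s
    by_cases h : a = 0 <;>
      simp [zerosFrom, h, ih (s + 1), ih 1, List.map_map]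

theorem zerosFrom_append : ∀ (u v : List Int) (s : Int),
    zerosFrom s (u ++ v) = zerosFrom s u ++ zerosFrom (s + u.length) v := by
  intro u
  induction u with
  | nil => intro v s; simp [zerosFrom]
  | cons a t ih =>
    intro v s
    by_cases h : a = 0 <;>
      simp [zerosFrom, h, ih v (s + 1)] <;>
      · congr 1; ring_nf

theorem zerosFrom_reverse : ∀ (l : List Int),
    zerosFrom 0 l.reverse
      = ((zerosFrom 0 l).map (fun z => (l.length : Int) - 1 - z)).reverse := by
  intro l
  induction l with
  | nil => simp [zerosFrom]
  | cons a t ih =>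
    rw [List.reverse_cons, zerosFrom_append, ih]
    have hR : (zerosFrom ((0 : Int) + 1) t).map (fun z => (((a :: t).length : Int)) - 1 - z)
        = (zerosFrom 0 t).map (fun z => (t.length : Int) - 1 - z) := by
      rw [show (0 : Int) + 1 = 1 by norm_num, zerosFrom_shift t 1, List.map_map]
      apply List.map_congr_left; intro z _
      simp only [Function.comp_apply, List.length_cons]
      push_cast; ring
    by_cases h : a = 0
    · subst h
      simp only [zerosFrom, ite_true, List.map_cons, List.reverse_cons]
      rw [hR]
      congr 1
      simp only [List.cons.injEq, List.length_reverse, List.length_cons, and_true]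
      push_cast; ring
    · simp only [zerosFrom, h, ite_false, List.append_nil]
      rw [hR]

theorem scanA_eq : ∀ (sol : List Int) (c idx cc start : Int),
    scanA c sol idx cc start =
      if c + 1 - cc ≤ 0 then none
      else
        match (zerosFrom idx sol)[(c - cc).toNat]? with
        | none => none
        | some z =>
            some ((if c = cc then start
                   else (zerosFrom idx sol).getD ((c - cc).toNat - 1) 0 + 1), z - 1) := by
  intro sol c
  induction sol with
  | nil =>
    intro idx cc start
    simp only [scanA, zerosFrom, List.getElem?_nil]
    by_cases h : c + 1 - cc ≤ 0 <;> simp [h]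
  | cons call rest ih =>
    intro idx cc start
    by_cases hz : call = 0
    · subst hz
      have hzer : zerosFrom idx ((0:Int) :: rest) = idx :: zerosFrom (idx + 1) rest := by
        simp [zerosFrom]
      by_cases hret : cc + 1 = c + 1
      · have hcc : cc = c := by omega
        have hstart' : (if cc + 1 = c then idx + 1 else start) = start := by
          rw [if_neg (by omega)]
        simp only [scanA, ite_true, if_pos hret, hstart']
        have h1 : ¬ (c + 1 - cc ≤ 0) := by omega
        have h2 : (c - cc).toNat = 0 := by omega
        rw [if_neg h1, hzer, h2, List.getElem?_cons_zero]
        rw [if_pos hcc.symm]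
      · have hlhs : scanA c ((0:Int) :: rest) idx cc start
            = scanA c rest (idx + 1) (cc + 1) (if cc + 1 = c then idx + 1 else start) := by
          simp [scanA, hret]
        rw [hlhs, ih]
        by_cases hle : c + 1 - cc ≤ 0
        · rw [if_pos (by omega : c + 1 - (cc + 1) ≤ 0), if_pos hle]
        · have hgt : ¬ (c + 1 - (cc + 1) ≤ 0) := by omega
          have hidx : (c - cc).toNat = (c - (cc + 1)).toNat + 1 := by omega
          rw [if_neg hgt, if_neg hle, hzer, hidx, List.getElem?_cons_succ]
          cases hg : (zerosFrom (idx + 1) rest)[(c - (cc + 1)).toNat]? with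
          | none => simp
          | some z =>
            simp only
            congr 2
            by_cases h2 : c = cc + 1
            · have h0 : (c - (cc + 1)).toNat = 0 := by omega
              rw [if_pos h2, if_pos (by omega : cc + 1 = c), h0]
              rw [if_neg (by omega : ¬ c = cc)]
              simp
            · have hne2 : c ≠ cc := by omega
              rw [if_neg h2, if_neg hne2]
              have h3 : (c - (cc + 1)).toNat + 1 - 1 = ((c - (cc + 1)).toNat - 1) + 1 := by
                omega
              rw [h3, List.getD_cons_succ]
    · have hzer : zerosFrom idx (call :: rest) = zerosFrom (idx + 1) rest := by
        simp [zerosFrom, hz]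
      simp only [scanA, hz, ite_false]
      rw [ih, hzer]

-- B's value in the normal-car branch, under Pre_
theorem alt_normal (c : Int) (sol : List Int) (n : Int)
    (hne : c ≠ n + 1) (h1 : 1 ≤ c) (h2 : c ≤ (sol.count 0 : Int)) :
    get_car_index_py_alt c sol n =
      ((if c = 1 then 0 else (zerosFrom 0 sol).getD ((c - 1).toNat - 1) 0 + 1),
       (zerosFrom 0 sol).getD ((c - 1).toNat) 0 - 1) := by
  unfold get_car_index_py_alt
  rw [zerosFrom_eq_filterMap]
  have hlen : (zerosFrom 0 sol).length = sol.count 0 := length_zerosFrom sol 0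
  have hguard : ¬ (c < 1 ∨ ((zerosFrom 0 sol).length : Int) < c) := by
    rw [hlen]; omega
  simp only [if_neg hne, if_neg hguard]
  have hlt1 : ((c - 1).toNat) < (zerosFrom 0 sol).length := by omega
  have hstop : PySem.List.pyGet? (zerosFrom 0 sol) (c - 1)
      = some ((zerosFrom 0 sol)[(c - 1).toNat]) :=
    PySem.List.pyGet?_eq_some_getElem _ (by omega) (by omega)
  rw [hstop]
  congr 1
  · by_cases hc1 : c = 1
    · simp [hc1]
    · have hlt2 : ((c - 2).toNat) < (zerosFrom 0 sol).length := by omega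
      have hstart : PySem.List.pyGet? (zerosFrom 0 sol) (c - 2)
          = some ((zerosFrom 0 sol)[(c - 2).toNat]) :=
        PySem.List.pyGet?_eq_some_getElem _ (by omega) (by omega)
      rw [if_neg hc1, if_neg hc1, hstart]
      simp only [Option.getD_some]
      have h3 : (c - 1).toNat - 1 = (c - 2).toNat := by omega
      rw [h3, List.getD_eq_getElem _ _ hlt2]
  · simp only [Option.getD_some]
    rw [List.getD_eq_getElem _ _ hlt1]

-- A's value in the normal-car branch, under Pre_
theorem a_normal (c : Int) (sol : List Int) (n : Int)
    (hne : c ≠ n + 1) (h1 : 1 ≤ c) (h2 : c ≤ (sol.count 0 : Int)) :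
    get_car_index_py c sol n =
      ((if c = 1 then 0 else (zerosFrom 0 sol).getD ((c - 1).toNat - 1) 0 + 1),
       (zerosFrom 0 sol).getD ((c - 1).toNat) 0 - 1) := by
  rw [get_car_index_py]
  simp only [if_neg hne]
  rw [scanA_eq]
  have hle : ¬ (c + 1 - 1 ≤ 0) := by omega
  have hlt : ((c - 1).toNat) < (zerosFrom 0 sol).length := by
    rw [length_zerosFrom]; omega
  rw [if_neg hle, List.getElem?_eq_getElem hlt]
  simp only
  congr 1
  rw [List.getD_eq_getElem _ _ hlt]

-- ===== VERDICT (by name: the statement is the Claim_ definition above) =====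
theorem get_car_index_py_spec : Claim_equal_get_car_index_py := by
  unfold Claim_equal_get_car_index_py
  intro c sol n _ hpre
  unfold Spec_get_car_index_py
  unfold Pre_get_car_index_py at hpre
  by_cases hdum : c = n + 1
  · -- dummy-car branch
    rw [if_pos hdum] at hpre
    obtain ⟨hn0, hcnt⟩ := hpre
    -- A's side
    rw [get_car_index_py]
    rw [if_pos hdum, if_neg hn0]
    have hne1 : (1 : Int) ≠ n + 1 := by omega
    have hcnt' : (1 : Int) ≤ (sol.reverse.count 0 : Int) := by
      rw [List.count_reverse]; exact_mod_cast hcnt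
    rw [a_normal 1 sol.reverse n hne1 le_rfl hcnt']
    -- compute the first zero of the reversed list from the last zero of sol
    have hlenz : (zerosFrom 0 sol).length = sol.count 0 := length_zerosFrom sol 0
    have hnz : zerosFrom 0 sol ≠ [] := by
      intro h; rw [h] at hlenz; simp at hlenz; omega
    have hrev := zerosFrom_reverse sol
    have hlenr : (zerosFrom 0 sol.reverse).length = sol.count 0 := by
      rw [length_zerosFrom, List.count_reverse]
    have h0lt : 0 < (zerosFrom 0 sol.reverse).length := by omega
    -- B's side
    unfold get_car_index_py_alt
    rw [zerosFrom_eq_filterMap, if_pos hdum]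
    rw [PySem.List.pyGet?_neg_one, List.getLast?_eq_some_getLast hnz]
    simp only
    -- relate A's head of reversed zeros to B's last zero
    have hhead : (zerosFrom 0 sol.reverse).getD ((1 - 1 : Int)).toNat 0
        = (sol.length : Int) - 1 - (zerosFrom 0 sol).getLast hnz := by
      have h0 : ((1 : Int) - 1).toNat = 0 := by decide
      have hlt : 0 < ((zerosFrom 0 sol).map
          (fun z => (sol.length : Int) - 1 - z)).reverse.length := by
        simp only [List.length_reverse, List.length_map]; omega
      rw [h0, hrev, List.getD_eq_getElem _ _ hlt, List.getElem_reverse, List.getElem_map]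
      congr 1
      rw [List.getLast_eq_getElem]
      congr 1
      simp only [List.length_map]
      omega
    rw [hhead, Prod.mk.injEq]
    exact ⟨by ring, rfl⟩
  · -- normal-car branch
    rw [if_neg hdum] at hpre
    obtain ⟨h1, h2⟩ := hpre
    rw [a_normal c sol n hdum h1 h2, alt_normal c sol n hdum h1 h2]
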